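-- pv_equiv track=rewrite | github.com/JaeguKim/ROAD-TO-BLUE-CODER | 2021 kakao/1.py | solution
-- ===== SOURCE A (Python) =====
-- def solution(new_id):
--     lower_case_id = new_id.lower()
--     legalChars = ['-','_','.']
--     new_id = new_id.lower()
--     resId = ''
--     for i in range(len(new_id)):
--         if new_id[i].isalpha() or new_id[i].isdigit() or new_id[i] in legalChars:
--             resId += new_id[i]
--     while '..' in resId: resId = resId.replace('..','.')
--     if resId[0] == '.':
--         resId = resId[1:]
--     if resId[-1] == '.':
--         resId = resId[:len(resId)-1]
--     if resId == '':
--         resId += 'a'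
--     if len(resId) >= 16:
--         resId = resId[:15]
--     if resId[-1] == '.':
--         resId = resId[:len(resId)-1]
--     if len(resId) <= 2:
--         while len(resId) <= 2: resId += 'a'
--     return resId
-- ===== SOURCE B (Python) =====
-- def solution(new_id):
--     # one linear pass: filter + collapse '..' + drop leading dot, all at once
--     res = []
--     for c in new_id.lower():
--         if c.isalnum() or c in '-_':
--             res.append(c)
--         elif c == '.' and res and res[-1] != '.':
--             res.append('.')
--     if res and res[-1] == '.':
--         res.pop()
--     if not res:
--         res.append('a')
--     del res[15:]
--     if res[-1] == '.':
--         res.pop()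
--     while len(res) < 3:
--         res.append('a')
--     return ''.join(res)
-- ===== Notes on version B (the rewrite author's own statement) =====
-- stated objective: simpler
-- what changed: B builds the normalized string in one linear pass (filtering, collapsing consecutive dots and dropping leading dots on the fly via the last appended char) instead of A's separate filter loop plus the repeated whole-string rescans of `while '..' in resId: resId = resId.replace('..','.')`, then applies the same tail fixups.
import Mathlib
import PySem

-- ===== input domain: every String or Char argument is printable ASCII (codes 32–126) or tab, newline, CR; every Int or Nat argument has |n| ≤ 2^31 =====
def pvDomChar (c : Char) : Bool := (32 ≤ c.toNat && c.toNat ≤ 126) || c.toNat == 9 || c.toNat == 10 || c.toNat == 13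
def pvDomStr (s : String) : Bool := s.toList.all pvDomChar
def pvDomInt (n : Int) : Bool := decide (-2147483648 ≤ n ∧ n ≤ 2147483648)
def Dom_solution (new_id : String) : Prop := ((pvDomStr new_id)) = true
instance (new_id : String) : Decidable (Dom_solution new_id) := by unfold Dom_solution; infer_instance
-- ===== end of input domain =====

-- B is ONE linear pass (filter + collapse dots + drop leading dot together) instead of A's
-- filter loop followed by repeated whole-string replace('..','.') rescans; same tail fixups.
-- ===== PORT A =====

/-- Hand port of Python `s.replace('..', '.')` for this fixed pattern: left-to-right,
non-overlapping — exact for the two-dot pattern. -/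
def pvReplaceDD : List Char → List Char
  | [] => []
  | [c] => [c]
  | a :: b :: t => if a = '.' ∧ b = '.' then '.' :: pvReplaceDD t else a :: pvReplaceDD (b :: t)

/-- Port of A's `while '..' in resId: resId = resId.replace('..','.')`; the fuel argument is
only a totality guard (each iteration shortens the string, so `length + 1` iterations suffice). -/
def pvCollapseLoop : Nat → List Char → List Char
  | 0, s => s
  | f + 1, s =>
    if PySem.Chars.isIn ['.', '.'] s then pvCollapseLoop f (pvReplaceDD s) else s

/-- Port of A's trailing `while len(resId) <= 2: resId += 'a'`; fuel 3 is a totality guard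
(the loop runs at most 3 times). -/
def pvPadA : Nat → List Char → List Char
  | 0, s => s
  | f + 1, s => if s.length ≤ 2 then pvPadA f (s ++ ['a']) else s

-- A indexes `resId[0]` / `resId[-1]` where Python would raise on an empty string
-- (excluded by Pre_solution); the port reads those with a `' '` default.
def solution (new_id : String) : String :=
  let lowered := (PySem.Str.lower new_id).toList
  let resId := (PySem.List.pyRange 0 (PySem.List.len lowered) 1).foldl
      (fun acc i =>
        let c := PySem.List.pyGetD lowered i ' '
        if (PySem.Chars.isalpha c || PySem.Chars.isdigit c || decide (c ∈ ['-', '_', '.'])) = true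
        then acc ++ [c] else acc) []
  let r1 := pvCollapseLoop (resId.length + 1) resId
  let r2 := if (PySem.List.pyGet? r1 0).getD ' ' = '.' then PySem.List.slice r1 (some 1) none else r1
  let r3 := if (PySem.List.pyGet? r2 (-1)).getD ' ' = '.' then PySem.List.slice r2 none (some ((r2.length : Int) - 1)) else r2
  let r4 := if r3 = [] then r3 ++ ['a'] else r3
  let r5 := if 16 ≤ r4.length then PySem.List.slice r4 none (some 15) else r4
  let r6 := if (PySem.List.pyGet? r5 (-1)).getD ' ' = '.' then PySem.List.slice r5 none (some ((r5.length : Int) - 1)) else r5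
  let r7 := if r6.length ≤ 2 then pvPadA 3 r6 else r6
  String.ofList r7

-- ===== PORT B =====

/-- Port of B's `while len(res) < 3: res.append('a')`; fuel 3 is a totality guard
(the loop runs at most 3 times). -/
def pvPadB : Nat → List Char → List Char
  | 0, s => s
  | f + 1, s => if s.length < 3 then pvPadB f (s ++ ['a']) else s

def solution_alt (new_id : String) : String :=
  let res := (PySem.Str.lower new_id).toList.foldl
      (fun acc c =>
        if (PySem.Chars.isalnum c || decide (c ∈ ['-', '_'])) = true then acc ++ [c]
        else if c = '.' ∧ acc ≠ [] ∧ acc.getLast? ≠ some '.' then acc ++ ['.']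
        else acc) []
  let res1 := if res.getLast? = some '.' then res.dropLast else res
  let res2 := if res1 = [] then ['a'] else res1
  let res3 := res2.take 15
  let res4 := if res3.getLast? = some '.' then res3.dropLast else res3
  pvPadB 3 res4 |> String.ofList

-- ===== PRECONDITION & SPEC =====
-- Pre_ excludes exactly the inputs on which Python A raises IndexError: strings with no
-- alphanumeric, '-' or '_' character (the filtered string is empty or collapses to a lone dot,
-- and A indexes resId[0] / resId[-1] on the empty string).
def Pre_solution (new_id : String) : Prop :=
  new_id.toList.any (fun c => PySem.Chars.isalnum c || decide (c ∈ ['-', '_'])) = true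
instance (new_id : String) : Decidable (Pre_solution new_id) := by unfold Pre_solution; infer_instance

def pvWitness_solution : String := "abc"

def Spec_solution (new_id : String) (out : String) : Prop := out = solution_alt new_id
instance (new_id : String) (out : String) : Decidable (Spec_solution new_id out) := by unfold Spec_solution; infer_instance

-- ===== CLAIM (what is proved, stated in full; the proofs are below) =====
def Claim_equal_solution : Prop := ∀ (new_id : String), Dom_solution new_id → Pre_solution new_id → Spec_solution new_id (solution new_id)

-- ===== LEMMAS AND PROOFS =====

/-- Proof-side normal form: collapse every run of consecutive dots to a single dot. -/
def pvCollapse : List Char → List Char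
  | [] => []
  | [c] => [c]
  | a :: b :: t => if a = '.' ∧ b = '.' then pvCollapse (b :: t) else a :: pvCollapse (b :: t)

def pvDropLead (s : List Char) : List Char :=
  if s.head? = some '.' then s.tail else s

-- A's filter condition
def pvFA (c : Char) : Bool := PySem.Chars.isalpha c || PySem.Chars.isdigit c || decide (c ∈ ['-', '_', '.'])

theorem pvReplaceDD_dd (t : List Char) : pvReplaceDD ('.' :: '.' :: t) = '.' :: pvReplaceDD t := by
  simp [pvReplaceDD]

theorem pvReplaceDD_length_le (s : List Char) : (pvReplaceDD s).length ≤ s.length := by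
  fun_induction pvReplaceDD s <;> simp_all <;> omega

/-- `'..' in s` shortens the string by at least one on each replace (termination of A's while loop). -/
theorem pvReplaceDD_length_lt (s : List Char) (h : PySem.Chars.isIn ['.', '.'] s = true) :
    (pvReplaceDD s).length < s.length := by
  rw [PySem.Chars.isIn_iff_infix] at h
  obtain ⟨p, q, hs⟩ := h
  induction p generalizing s with
  | nil =>
    subst hs
    have := pvReplaceDD_length_le q
    simp only [List.nil_append, List.cons_append, pvReplaceDD_dd, List.length_cons]
    omega
  | cons a p ih =>
    subst hs
    rcases hq : (p ++ ['.', '.'] ++ q) with _ | ⟨b, t⟩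
    · exact absurd hq (by simp)
    · simp only [List.cons_append, hq, pvReplaceDD]
      split
      · have := pvReplaceDD_length_le t
        simp; omega
      · have := ih (p ++ ['.', '.'] ++ q) rfl
        rw [hq] at this
        simp at this ⊢; omega

theorem pvCollapse_cons_cons (a b : Char) (t : List Char) :
    pvCollapse (a :: b :: t) = if a = '.' ∧ b = '.' then pvCollapse (b :: t) else a :: pvCollapse (b :: t) := rfl

theorem pvCollapse_dd (t : List Char) : pvCollapse ('.' :: '.' :: t) = pvCollapse ('.' :: t) := by
  simp [pvCollapse_cons_cons]

theorem pvCollapse_cons_ne (a : Char) (u : List Char) (ha : a ≠ '.') :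
    pvCollapse (a :: u) = a :: pvCollapse u := by
  cases u with
  | nil => rfl
  | cons b t => rw [pvCollapse_cons_cons, if_neg]; rintro ⟨h, -⟩; exact ha h

theorem pvCollapse_head? (s : List Char) : (pvCollapse s).head? = s.head? := by
  fun_induction pvCollapse s with
  | case1 => rfl
  | case2 => rfl
  | case3 a b t h ih => obtain ⟨rfl, rfl⟩ := h; rw [ih]; rfl
  | case4 a b t h ih => rfl

theorem pvCollapse_fixed_of_not_isIn (s : List Char) (h : PySem.Chars.isIn ['.', '.'] s = false) :
    pvCollapse s = s := by
  rw [PySem.Chars.isIn_eq_false_iff] at h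
  induction s with
  | nil => rfl
  | cons a u ih =>
    cases u with
    | nil => rfl
    | cons b t =>
      rw [pvCollapse_cons_cons, if_neg, ih]
      · exact fun hinf => h (hinf.trans (List.suffix_cons a (b :: t)).isInfix)
      · rintro ⟨rfl, rfl⟩
        exact h ⟨[], t, rfl⟩

theorem pvCollapse_replaceDD (s : List Char) :
    pvCollapse (pvReplaceDD s) = pvCollapse s ∧
    pvCollapse ('.' :: pvReplaceDD s) = pvCollapse ('.' :: s) := by
  fun_induction pvReplaceDD s with
  | case1 => exact ⟨rfl, rfl⟩
  | case2 c => exact ⟨rfl, rfl⟩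
  | case3 a b t h ih =>
    obtain ⟨rfl, rfl⟩ := h
    obtain ⟨ih1, ih2⟩ := ih
    refine ⟨?_, ?_⟩
    · rw [pvCollapse_dd, ih2]
    · show pvCollapse ('.' :: '.' :: pvReplaceDD t) = pvCollapse ('.' :: '.' :: '.' :: t)
      rw [pvCollapse_dd, pvCollapse_dd, pvCollapse_dd, ih2]
  | case4 a b t h ih =>
    obtain ⟨ih1, ih2⟩ := ih
    by_cases ha : a = '.'
    · subst ha
      refine ⟨ih2, ?_⟩
      show pvCollapse ('.' :: '.' :: pvReplaceDD (b :: t)) = pvCollapse ('.' :: '.' :: b :: t)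
      rw [pvCollapse_dd, pvCollapse_dd]
      exact ih2
    · have g1 : pvCollapse (a :: pvReplaceDD (b :: t)) = pvCollapse (a :: b :: t) := by
        rw [pvCollapse_cons_ne a _ ha, pvCollapse_cons_ne a _ ha, ih1]
      refine ⟨g1, ?_⟩
      show pvCollapse ('.' :: a :: pvReplaceDD (b :: t)) = pvCollapse ('.' :: a :: b :: t)
      rw [pvCollapse_cons_cons, if_neg (fun hc => ha hc.2), g1,
        pvCollapse_cons_cons ('.') a (b :: t), if_neg (fun hc => ha hc.2)]

theorem pvCollapseLoop_eq : ∀ (f : Nat) (s : List Char), s.length < f →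
    pvCollapseLoop f s = pvCollapse s
  | 0, s, h => absurd h (by omega)
  | f + 1, s, h => by
    rw [pvCollapseLoop]
    split
    · next hin =>
      rw [pvCollapseLoop_eq f (pvReplaceDD s)
        (by have := pvReplaceDD_length_lt s hin; omega), (pvCollapse_replaceDD s).1]
    · next hin => rw [pvCollapse_fixed_of_not_isIn s (by simpa using hin)]

theorem pvCollapse_append_non_dot (u : List Char) (c : Char) (hc : c ≠ '.') :
    pvCollapse (u ++ [c]) = pvCollapse u ++ [c] := by
  fun_induction pvCollapse u with
  | case1 => rfl
  | case2 a =>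
    show pvCollapse (a :: [c]) = [a, c]
    rw [pvCollapse_cons_cons, if_neg (fun hcc => hc hcc.2)]
    rfl
  | case3 a b t h ih =>
    show pvCollapse (a :: b :: (t ++ [c])) = _
    rw [pvCollapse_cons_cons, if_pos h]
    simpa using ih
  | case4 a b t h ih =>
    show pvCollapse (a :: b :: (t ++ [c])) = _
    rw [pvCollapse_cons_cons, if_neg h]
    simp only [List.cons_append] at ih ⊢
    rw [ih]

theorem pvCollapse_append_dot (u : List Char) (hu : u.getLast? ≠ some '.') :
    pvCollapse (u ++ ['.']) = pvCollapse u ++ ['.'] := by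
  fun_induction pvCollapse u with
  | case1 => rfl
  | case2 a =>
    show pvCollapse (a :: ['.']) = [a, '.']
    rw [pvCollapse_cons_cons, if_neg]
    · rfl
    · rintro ⟨h, -⟩; simp [h] at hu
  | case3 a b t h ih =>
    show pvCollapse (a :: b :: (t ++ ['.'])) = _
    rw [pvCollapse_cons_cons, if_pos h]
    have := ih (by simpa using hu)
    simpa using this
  | case4 a b t h ih =>
    show pvCollapse (a :: b :: (t ++ ['.'])) = _
    rw [pvCollapse_cons_cons, if_neg h]
    have := ih (by simpa using hu)
    simp only [List.cons_append] at this ⊢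
    rw [this]

theorem pvCollapse_absorb (u v : List Char) (hu : u.getLast? = some '.') :
    pvCollapse (u ++ '.' :: v) = pvCollapse (u ++ v) := by
  induction u with
  | nil => simp at hu
  | cons a u' ih =>
    cases u' with
    | nil =>
      simp only [List.getLast?_singleton, Option.some.injEq] at hu
      subst hu
      show pvCollapse ('.' :: '.' :: v) = pvCollapse ('.' :: v)
      exact pvCollapse_dd v
    | cons b t =>
      have hu' : (b :: t).getLast? = some '.' := by simpa using hu
      have ihe := ih hu'
      show pvCollapse (a :: ((b :: t) ++ '.' :: v)) = pvCollapse (a :: ((b :: t) ++ v))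
      simp only [List.cons_append] at ihe ⊢
      rw [pvCollapse_cons_cons, pvCollapse_cons_cons a b (t ++ v)]
      by_cases h : a = '.' ∧ b = '.'
      · rw [if_pos h, if_pos h, ihe]
      · rw [if_neg h, if_neg h, ihe]

theorem pvDropLead_collapse_dot (v : List Char) :
    pvDropLead (pvCollapse ('.' :: v)) = pvDropLead (pvCollapse v) := by
  cases v with
  | nil => rfl
  | cons b v' =>
    by_cases hb : b = '.'
    · subst hb
      rw [pvCollapse_dd]
    · have h1 : pvCollapse ('.' :: b :: v') = '.' :: pvCollapse (b :: v') := by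
        rw [pvCollapse_cons_cons, if_neg (fun hc => hb hc.2)]
      have h2 : (pvCollapse (b :: v')).head? = some b := by
        rw [pvCollapse_head?]; rfl
      rw [h1]
      have hL : pvDropLead ('.' :: pvCollapse (b :: v')) = pvCollapse (b :: v') := by
        simp [pvDropLead]
      have hR : pvDropLead (pvCollapse (b :: v')) = pvCollapse (b :: v') := by
        rw [pvDropLead, if_neg]
        rw [h2]
        simp [hb]
      rw [hL, hR]

theorem pvFoldB (L acc : List Char) (h1 : pvCollapse acc = acc) (h2 : acc.head? ≠ some '.') :
    L.foldl (fun acc c =>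
        if (PySem.Chars.isalnum c || decide (c ∈ ['-', '_'])) = true then acc ++ [c]
        else if c = '.' ∧ acc ≠ [] ∧ acc.getLast? ≠ some '.' then acc ++ ['.']
        else acc) acc
      = pvDropLead (pvCollapse (acc ++ L.filter pvFA)) := by
  induction L generalizing acc with
  | nil =>
    simp only [List.foldl_nil, List.filter_nil, List.append_nil, h1, pvDropLead, if_neg h2]
  | cons c L' ih =>
    simp only [List.foldl_cons]
    by_cases hgood : (PySem.Chars.isalnum c || decide (c ∈ ['-', '_'])) = true
    · rw [if_pos hgood]
      have hc : c ≠ '.' := by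
        rintro rfl; revert hgood; decide
      have hfa : pvFA c = true := by
        simp only [pvFA, PySem.Chars.isalnum, Bool.or_eq_true, decide_eq_true_eq,
          List.mem_cons, List.not_mem_nil, or_false] at hgood ⊢
        tauto
      have hh2 : (acc ++ [c]).head? ≠ some '.' := by
        cases acc with
        | nil => simpa using hc
        | cons x xs => simpa using h2
      rw [ih (acc ++ [c]) (by rw [pvCollapse_append_non_dot acc c hc, h1]) hh2]
      rw [List.filter_cons_of_pos hfa]
      simp
    · rw [if_neg hgood]
      by_cases hc : c = '.'
      · subst hc
        have hfa : pvFA '.' = true := by decide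
        rw [List.filter_cons_of_pos hfa]
        rcases hacc : acc with _ | ⟨a, acc'⟩
        · rw [if_neg (by rintro ⟨-, h, -⟩; exact h rfl)]
          rw [ih [] rfl (by simp)]
          simp only [List.nil_append]
          rw [pvDropLead_collapse_dot]
        · rw [← hacc]
          have haccne : acc ≠ [] := by rw [hacc]; simp
          by_cases hlast : acc.getLast? = some '.'
          · rw [if_neg (by rintro ⟨-, -, h⟩; exact h hlast)]
            rw [ih acc h1 h2, pvCollapse_absorb _ _ hlast]
          · rw [if_pos ⟨rfl, haccne, hlast⟩]
            have hh2 : (acc ++ ['.']).head? ≠ some '.' := by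
              cases acc with
              | nil => exact absurd rfl haccne
              | cons x xs => simpa using h2
            rw [ih (acc ++ ['.']) (by rw [pvCollapse_append_dot _ hlast, h1]) hh2]
            simp
      · have hfa : pvFA c = false := by
          by_contra hne
          have htrue : pvFA c = true := by revert hne; cases pvFA c <;> simp
          apply hgood
          simp only [pvFA, PySem.Chars.isalnum, Bool.or_eq_true, decide_eq_true_eq,
            List.mem_cons, List.not_mem_nil, or_false] at htrue ⊢
          tauto
        rw [if_neg (by rintro ⟨h, -⟩; exact hc h)]
        rw [List.filter_cons_of_neg (by simp [hfa]), ih acc h1 h2]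

theorem pvPadB_of_ge (f : Nat) (s : List Char) (h : ¬ s.length < 3) : pvPadB f s = s := by
  cases f with
  | zero => rfl
  | succ f => rw [pvPadB, if_neg h]

theorem pvPadA_eq_pvPadB : ∀ (f : Nat) (s : List Char), pvPadA f s = pvPadB f s
  | 0, s => rfl
  | f + 1, s => by
    rw [pvPadA, pvPadB]
    rcases Nat.lt_or_ge s.length 3 with h | h
    · rw [if_pos (by omega), if_pos h, pvPadA_eq_pvPadB f]
    · rw [if_neg (by omega), if_neg (by omega)]

theorem pvHeadD (l : List Char) : (l.head?.getD ' ' = '.') ↔ l.head? = some '.' := by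
  cases l <;> simp

theorem pvLastD (l : List Char) : (l.getLast?.getD ' ' = '.') ↔ l.getLast? = some '.' := by
  rcases h : l.getLast? with _ | c <;> simp

theorem pv_main (new_id : String) : solution new_id = solution_alt new_id := by
  dsimp only [solution, solution_alt]
  rw [PySem.List.foldl_pyRange_zero_pyGetD ((PySem.Str.lower new_id).toList) ' '
    (fun acc c => if (PySem.Chars.isalpha c || PySem.Chars.isdigit c || decide (c ∈ ['-', '_', '.'])) = true
      then acc ++ [c] else acc) []]
  rw [pvFoldB _ [] rfl (by simp)]
  set L := (PySem.Str.lower new_id).toList with hL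
  have hfilters : L.foldl (fun acc c =>
      if (PySem.Chars.isalpha c || PySem.Chars.isdigit c || decide (c ∈ ['-', '_', '.'])) = true
      then acc ++ [c] else acc) [] = L.filter pvFA := by
    rw [PySem.List.foldl_append_ite_eq_filter]
    simp only [List.nil_append]
    refine List.filter_congr fun x _ => ?_
    by_cases h1 : x = '-' <;> by_cases h2 : x = '_' <;> by_cases h3 : x = '.' <;>
      simp [pvFA, h1, h2, h3]
  rw [hfilters, pvCollapseLoop_eq _ _ (Nat.lt_succ_self _)]
  set F := L.filter pvFA with hF
  have hlead : (if (PySem.List.pyGet? (pvCollapse F) 0).getD ' ' = '.'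
      then PySem.List.slice (pvCollapse F) (some 1) none else pvCollapse F)
      = pvDropLead (pvCollapse F) := by
    rw [PySem.List.pyGet?_zero, pvDropLead]
    have hh : (pvCollapse F)[0]? = (pvCollapse F).head? := by
      rw [List.head?_eq_getElem?]
    rw [hh]
    split_ifs with h1 h2 h2
    · exact PySem.List.slice_from_one _
    · exact absurd ((pvHeadD _).1 h1) h2
    · exact absurd ((pvHeadD _).2 h2) h1
    · rfl
  rw [hlead]
  simp only [List.nil_append]
  set M := pvDropLead (pvCollapse F) with hM
  have hstrip : ∀ (l : List Char),
      (if (PySem.List.pyGet? l (-1)).getD ' ' = '.'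
        then PySem.List.slice l none (some ((l.length : Int) - 1)) else l)
      = (if l.getLast? = some '.' then l.dropLast else l) := by
    intro l
    rw [PySem.List.pyGet?_neg_one]
    split_ifs with h1 h2 h2
    · have hne : l ≠ [] := by rintro rfl; simp at h2
      have hlen : (1 : Int) ≤ l.length := by
        have := List.length_pos_iff.2 hne; exact_mod_cast this
      rw [PySem.List.slice_to _ (by omega)]
      have hto : ((l.length : Int) - 1).toNat = l.length - 1 := by omega
      rw [hto, ← List.dropLast_eq_take]
    · exact absurd ((pvLastD _).1 h1) h2
    · exact absurd ((pvLastD _).2 h2) h1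
    · rfl
  rw [hstrip M]
  set M1 := (if M.getLast? = some '.' then M.dropLast else M) with hM1
  have hempty : (if M1 = [] then M1 ++ ['a'] else M1) = (if M1 = [] then ['a'] else M1) := by
    split_ifs with h <;> simp [h]
  rw [hempty]
  set M2 := (if M1 = [] then ['a'] else M1) with hM2
  have htrunc : (if 16 ≤ M2.length then PySem.List.slice M2 none (some 15) else M2)
      = M2.take 15 := by
    split_ifs with h
    · have h15 : (15 : Int) = ((15 : Nat) : Int) := by norm_num
      rw [h15, PySem.List.slice_to_natCast]
    · rw [List.take_of_length_le (by omega)]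
  rw [htrunc]
  set M3 := M2.take 15 with hM3
  rw [hstrip M3]
  set M4 := (if M3.getLast? = some '.' then M3.dropLast else M3) with hM4
  have hpad : (if M4.length ≤ 2 then pvPadA 3 M4 else M4) = pvPadB 3 M4 := by
    split_ifs with h
    · exact pvPadA_eq_pvPadB 3 M4
    · rw [pvPadB_of_ge 3 M4 (by omega)]
  rw [hpad]

-- ===== VERDICT (by name: the statement is the Claim_ definition above) =====
theorem solution_spec : Claim_equal_solution := by
  intro s _ _; exact pv_main s
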